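-- pv_equiv track=rewrite | github.com/Chlebeg/Script-Programming | lab_2/during_class/prog_4.py | spaces_mode
-- ===== SOURCE A (Python) =====
-- def spaces_mode(line):
--     result = ""
--     first_char_flag = False
--     for i in line:
--         if not first_char_flag and i != " ":
--             first_char_flag = True
--         elif not first_char_flag:
--             result = result + i
--         if first_char_flag and i != " ":
--             result = result + i
--     return result
-- ===== SOURCE B (Python) =====
-- def spaces_mode(line):
--     n = len(line) - len(line.lstrip(' '))
--     return line[:n] + line.replace(' ', '')
-- ===== Notes on version B (the rewrite author's own statement) =====
-- stated objective: faster
-- what changed: Replaces A's flag-driven per-character loop with quadratic string concatenation by two linear string-method passes: count leading spaces via lstrip, keep that prefix, and append the line with spaces removed via replace.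
import Mathlib
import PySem

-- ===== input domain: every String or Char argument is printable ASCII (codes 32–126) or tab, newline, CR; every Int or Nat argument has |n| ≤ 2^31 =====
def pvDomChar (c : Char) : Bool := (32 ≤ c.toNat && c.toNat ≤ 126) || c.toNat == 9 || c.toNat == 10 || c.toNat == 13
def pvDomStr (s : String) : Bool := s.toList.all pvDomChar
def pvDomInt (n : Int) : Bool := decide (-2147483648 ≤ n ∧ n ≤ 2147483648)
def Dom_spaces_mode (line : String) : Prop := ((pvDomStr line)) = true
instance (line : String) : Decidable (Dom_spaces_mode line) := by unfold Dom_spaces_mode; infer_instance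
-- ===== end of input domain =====

-- B: keep the leading-space prefix (length by lstrip(' ')) and append the line with all spaces removed; A's flag-driven loop disappears.
-- ===== PORT A =====
-- one iteration of A's loop body over state (result, first_char_flag)
def spacesStepA (st : List Char × Bool) (i : Char) : List Char × Bool :=
  let result := st.1
  let first_char_flag := st.2
  let (result, first_char_flag) :=
    if ¬first_char_flag ∧ i ≠ ' ' then (result, true)
    else if ¬first_char_flag then (result ++ [i], first_char_flag)
    else (result, first_char_flag)
  if first_char_flag ∧ i ≠ ' ' then (result ++ [i], first_char_flag)
  else (result, first_char_flag)

def spaces_mode (line : String) : String :=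
  ((line.toList.foldl spacesStepA ([], false)).1).asString

-- ===== PORT B =====
-- len(line) - len(line.lstrip(' ')) is ported as length minus length of dropWhile (= ' ');
-- line[:n] as take, replace(' ','') as filter (≠ ' '): each exact for this ASCII-space case.
def spaces_mode_alt (line : String) : String :=
  let cs := line.toList
  let n := cs.length - (cs.dropWhile (fun c => c = ' ')).length
  ((cs.take n) ++ cs.filter (fun c => c ≠ ' ')).asString

-- ===== PRECONDITION & SPEC =====
def Spec_spaces_mode (line : String) (out : String) : Prop := out = spaces_mode_alt line
instance (line : String) (out : String) : Decidable (Spec_spaces_mode line out) := by unfold Spec_spaces_mode; infer_instance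

-- ===== CLAIM (what is proved, stated in full; the proofs are below) =====
def Claim_equal_spaces_mode : Prop := ∀ (line : String), Dom_spaces_mode line → Spec_spaces_mode line (spaces_mode line)

-- ===== LEMMAS AND PROOFS =====

-- ===== VERDICT (by name: the statement is the Claim_ definition above) =====
lemma foldA_true (cs : List Char) (acc : List Char) :
    cs.foldl spacesStepA (acc, true) = (acc ++ cs.filter (fun c => c ≠ ' '), true) := by
  induction cs generalizing acc with
  | nil => simp
  | cons c cs ih =>
    by_cases h : c = ' ' <;> simp [spacesStepA, h, List.foldl_cons, ih]

lemma foldA_false (cs : List Char) (acc : List Char) :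
    ((cs.foldl spacesStepA (acc, false)).1) =
      acc ++ cs.takeWhile (fun c => c = ' ') ++ cs.filter (fun c => c ≠ ' ') := by
  induction cs generalizing acc with
  | nil => simp
  | cons c cs ih =>
    by_cases h : c = ' '
    · simp [spacesStepA, h, List.foldl_cons, ih]
    · simp [spacesStepA, h, List.foldl_cons, foldA_true]

lemma take_takeWhile (p : Char → Bool) (cs : List Char) :
    cs.take ((cs.takeWhile p).length) = cs.takeWhile p := by
  induction cs with
  | nil => rfl
  | cons c cs ih =>
    by_cases h : p c <;> simp [h, ih]

lemma len_sub_dropWhile (p : Char → Bool) (cs : List Char) :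
    cs.length - (cs.dropWhile p).length = (cs.takeWhile p).length := by
  have h : (cs.takeWhile p).length + (cs.dropWhile p).length = cs.length := by
    rw [← List.length_append, List.takeWhile_append_dropWhile]
  omega

theorem spaces_mode_spec : Claim_equal_spaces_mode := by
  intro line _
  show (List.foldl spacesStepA ([], false) line.toList).1.asString =
      (List.take (line.toList.length -
          (List.dropWhile (fun c => decide (c = ' ')) line.toList).length) line.toList ++
        List.filter (fun c => decide (c ≠ ' ')) line.toList).asString
  rw [len_sub_dropWhile, take_takeWhile, foldA_false]
  simp
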